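-- pv_equiv track=rewrite | github.com/WC2001/wdi | wdi2/13.py | f
-- ===== SOURCE A (Python) =====
-- def f(x):
--     j = x%10
--     x //= 10
--     while x>0:
--         if j == x%10:
--             return False
--         x //=10
--     return True
-- ===== SOURCE B (Python) =====
-- def f(x):
--     if x < 10:
--         return True
--     s = str(x)
--     return s[-1] not in s[:-1]
-- ===== Notes on version B (the rewrite author's own statement) =====
-- stated objective: idiomatic
-- what changed: Replaces the digit-peeling early-exit while loop (repeated modulus and floor division) with a string representation: str(x), then a single slice-and-membership test s[-1] not in s[:-1], after guarding the single-digit and non-positive inputs on which A never enters its loop.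
import Mathlib
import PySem

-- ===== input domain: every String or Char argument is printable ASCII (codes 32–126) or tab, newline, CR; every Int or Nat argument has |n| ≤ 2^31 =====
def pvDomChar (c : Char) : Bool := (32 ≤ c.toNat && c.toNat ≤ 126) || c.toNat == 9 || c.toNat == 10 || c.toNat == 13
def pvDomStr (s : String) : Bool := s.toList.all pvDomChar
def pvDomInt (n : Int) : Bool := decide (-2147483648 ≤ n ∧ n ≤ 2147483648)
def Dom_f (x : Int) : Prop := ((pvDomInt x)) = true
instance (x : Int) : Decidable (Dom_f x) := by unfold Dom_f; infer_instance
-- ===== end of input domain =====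

-- B replaces A's digit-peeling early-exit while loop (modulus/division) with str(x) and one
-- slice-and-membership test s[-1] not in s[:-1] (idiomatic; same cost).

-- ===== PORT A =====
-- the while loop: state is (x, j); returns False on a repeated last digit
def fLoop (x j : Int) : Bool :=
  if h : x > 0 then
    if j = PySem.Int.mod x 10 then false
    else fLoop (PySem.Int.floordiv x 10) j
  else true
termination_by x.toNat
decreasing_by
  rw [PySem.Int.floordiv_eq_ediv_of_pos (by omega)]
  omega

def f (x : Int) : Bool :=
  fLoop (PySem.Int.floordiv x 10) (PySem.Int.mod x 10)

-- ===== PORT B =====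
-- Source B's s = str(x) is ported as its character list (PySem.Int.toChars); s[-1] is the
-- total indexing pyGetD at -1 (s is never empty, so no IndexError arises) and the
-- one-character `not in s[:-1]` is exactly char non-membership in the slice.
def f_alt (x : Int) : Bool :=
  if x < 10 then true
  else
    let s := PySem.Int.toChars x
    !(PySem.List.slice s none (some (-1))).contains (PySem.List.pyGetD s (-1) ' ')

-- ===== PRECONDITION & SPEC =====
def Spec_f (x : Int) (out : Bool) : Prop := out = f_alt x
instance (x : Int) (out : Bool) : Decidable (Spec_f x out) := by unfold Spec_f; infer_instance

-- ===== CLAIM (what is proved, stated in full; the proofs are below) =====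
def Claim_equal_f : Prop := ∀ (x : Int), Dom_f x → Spec_f x (f x)

-- ===== LEMMAS AND PROOFS =====

-- the digit-character list of n (least significant last), [] for n = 0
def digs (n : Nat) : List Char :=
  if h : n = 0 then [] else digs (n / 10) ++ [Nat.digitChar (n % 10)]
termination_by n
decreasing_by exact Nat.div_lt_self (Nat.pos_of_ne_zero h) (by omega)

lemma toDigitsCore_acc (fuel : Nat) : ∀ (n : Nat) (l : List Char),
    Nat.toDigitsCore 10 fuel n l = Nat.toDigitsCore 10 fuel n [] ++ l := by
  induction fuel with
  | zero => intro n l; simp [Nat.toDigitsCore]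
  | succ fu ih =>
    intro n l
    simp only [Nat.toDigitsCore]
    by_cases h : n / 10 = 0
    · simp [h]
    · rw [if_neg h, if_neg h, ih (n / 10) (Nat.digitChar (n % 10) :: l),
        ih (n / 10) [Nat.digitChar (n % 10)]]
      simp

lemma toDigitsCore_eq_digs (fuel : Nat) : ∀ n : Nat, 0 < n → n < fuel →
    Nat.toDigitsCore 10 fuel n [] = digs n := by
  induction fuel with
  | zero => intro n h hf; omega
  | succ fu ih =>
    intro n h hf
    simp only [Nat.toDigitsCore]
    rw [digs.eq_def, dif_neg (by omega)]
    by_cases hd : n / 10 = 0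
    · rw [if_pos hd, hd, digs.eq_def]; simp
    · rw [if_neg hd, toDigitsCore_acc, ih (n / 10) (Nat.pos_of_ne_zero hd) (by omega)]

lemma toDigits_eq_digs (n : Nat) (h : 0 < n) : Nat.toDigits 10 n = digs n :=
  toDigitsCore_eq_digs (n + 1) n h (Nat.lt_succ_self n)

lemma digitChar_inj {a b : Nat} (ha : a < 10) (hb : b < 10)
    (h : Nat.digitChar a = Nat.digitChar b) : a = b := by
  interval_cases a <;> interval_cases b <;> revert h <;> decide

lemma fLoop_digs (k j : Nat) (hj : j < 10) :
    fLoop (k : Int) (j : Int) = !decide (Nat.digitChar j ∈ digs k) := by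
  induction k using Nat.strong_induction_on with
  | _ k ih =>
    rw [fLoop.eq_def]
    by_cases hk : k = 0
    · subst hk
      rw [dif_neg (by omega)]
      rw [digs.eq_def]; simp
    · rw [dif_pos (by exact_mod_cast Nat.pos_of_ne_zero hk)]
      have hmod : PySem.Int.mod (k : Int) 10 = ((k % 10 : Nat) : Int) := by
        exact_mod_cast PySem.Int.mod_natCast k 10
      have hdiv : PySem.Int.floordiv (k : Int) 10 = ((k / 10 : Nat) : Int) := by
        exact_mod_cast PySem.Int.floordiv_natCast k 10
      rw [hmod, hdiv]
      rw [digs.eq_def, dif_neg hk]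
      by_cases hd : j = k % 10
      · rw [if_pos (by exact_mod_cast hd)]
        simp [hd]
      · rw [if_neg (by exact_mod_cast hd)]
        rw [ih (k / 10) (Nat.div_lt_self (Nat.pos_of_ne_zero hk) (by omega))]
        have hne : Nat.digitChar j ≠ Nat.digitChar (k % 10) := fun h =>
          hd (digitChar_inj hj (Nat.mod_lt _ (by omega)) h)
        simp [hne]

-- ===== VERDICT (by name: the statement is the Claim_ definition above) =====
theorem f_spec : Claim_equal_f := by
  intro x _
  unfold Spec_f f f_alt
  by_cases hx : x < 10
  · rw [if_pos hx, fLoop.eq_def,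
      PySem.Int.floordiv_eq_ediv_of_pos (by omega : (0:Int) < 10),
      dif_neg (by omega)]
  · rw [if_neg hx]
    obtain ⟨m, rfl⟩ : ∃ m : Nat, x = (m : Int) :=
      ⟨x.toNat, (Int.toNat_of_nonneg (by omega)).symm⟩
    have hm : 10 ≤ m := by exact_mod_cast not_lt.mp hx
    have htc : PySem.Int.toChars (m : Int) = digs m := by
      unfold PySem.Int.toChars
      rw [if_neg (by omega)]
      simp only [Int.toNat_natCast]
      exact toDigits_eq_digs m (by omega)
    simp only [htc]
    rw [digs.eq_def, dif_neg (by omega)]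
    rw [PySem.List.pyGetD_neg_one_append_singleton, PySem.List.slice_to_neg_one,
      List.dropLast_concat]
    have hmod : PySem.Int.mod (m : Int) 10 = ((m % 10 : Nat) : Int) := by
      exact_mod_cast PySem.Int.mod_natCast m 10
    have hdiv : PySem.Int.floordiv (m : Int) 10 = ((m / 10 : Nat) : Int) := by
      exact_mod_cast PySem.Int.floordiv_natCast m 10
    rw [hmod, hdiv, fLoop_digs (m / 10) (m % 10) (Nat.mod_lt _ (by omega))]
    simp
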